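-- pv_equiv track=rewrite | github.com/ZekNikZ/adventofcode2022 | day08/puzzle1-bkp.py | check_visibility_vertical
-- ===== SOURCE A (Python) =====
-- def check_visibility_vertical(grid):
--     res = set()
--
--     max_heights = [-1] * len(grid[0])
--
--     for row in range(len(grid)):
--         for col in range(len(grid[0])):
--             if grid[row][col] > max_heights[col]:
--                 max_heights[col] = grid[row][col]
--                 res.add((row, col))
--
--     return res
-- ===== SOURCE B (Python) =====
-- def check_visibility_vertical(grid):
--     width = len(grid[0])
--     # phase 1: per-column prefix-max tables, seeded with -1 above the top row
--     cols = []
--     for c in range(width):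
--         acc = [-1]
--         for row in grid:
--             acc.append(max(acc[-1], row[c]))
--         cols.append(acc)
--     # phase 2: a cell is visible exactly where its column's prefix max strictly increases
--     res = set()
--     for r in range(len(grid)):
--         for c in range(width):
--             if cols[c][r + 1] > cols[c][r]:
--                 res.add((r, c))
--     return res
-- ===== Notes on version B (the rewrite author's own statement) =====
-- stated objective: alternative
-- what changed: B first builds an explicit per-column prefix-maximum table (column-wise accumulation, seeded with -1), then a separate pass marks exactly the cells where the column's prefix maximum strictly increases, instead of A's single row-major scan mutating a running max array in place.
import Mathlib
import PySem

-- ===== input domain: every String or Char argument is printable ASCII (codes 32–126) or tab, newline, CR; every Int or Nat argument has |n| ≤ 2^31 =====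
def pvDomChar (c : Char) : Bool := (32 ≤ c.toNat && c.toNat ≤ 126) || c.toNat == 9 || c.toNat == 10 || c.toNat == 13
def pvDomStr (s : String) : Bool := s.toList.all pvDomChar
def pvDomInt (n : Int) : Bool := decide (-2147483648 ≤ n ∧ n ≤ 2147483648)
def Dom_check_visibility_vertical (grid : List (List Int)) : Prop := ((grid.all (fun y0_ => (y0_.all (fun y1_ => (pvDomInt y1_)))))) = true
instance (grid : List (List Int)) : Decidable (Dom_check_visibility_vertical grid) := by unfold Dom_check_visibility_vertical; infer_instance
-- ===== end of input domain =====

-- B replaces A's single row-major scan with an in-place max array by an explicit per-column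
-- prefix-max table built first, then a separate strict-increase detection pass (objective: alternative).

-- ===== PORT A =====
-- Literal port of A. Indexing grid[row][col] / max_heights[col] uses List.getD: under
-- Pre_ every index is nonnegative and in range, where Python indexing equals getD.
def check_visibility_vertical (grid : List (List Int)) : List (Int × Int) :=
  let w := (grid.headD []).length   -- len(grid[0]); exact under Pre_ (grid ≠ [])
  ((List.range grid.length).foldl
    (fun (st : List Int × PySem.Set (Int × Int)) row =>
      (List.range w).foldl
        (fun (st : List Int × PySem.Set (Int × Int)) col =>
          if (grid.getD row []).getD col 0 > st.1.getD col (-1) then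
            (st.1.set col ((grid.getD row []).getD col 0),
             PySem.Set.add st.2 ((row : Int), (col : Int)))
          else st)
        st)
    (List.replicate w (-1), PySem.Set.empty)).2

-- ===== PORT B =====
-- acc = [-1]; for row in grid: acc.append(max(acc[-1], row[c]))
def pvColAcc (grid : List (List Int)) (c : Nat) : List Int :=
  grid.foldl (fun acc row => acc ++ [max (acc.getLastD (-1)) (row.getD c 0)]) [(-1 : Int)]

def check_visibility_vertical_alt (grid : List (List Int)) : List (Int × Int) :=
  let w := (grid.headD []).length   -- len(grid[0]); exact under Pre_
  let cols := (List.range w).map (pvColAcc grid)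
  (List.range grid.length).foldl
    (fun (res : PySem.Set (Int × Int)) r =>
      (List.range w).foldl
        (fun (res : PySem.Set (Int × Int)) c =>
          if (cols.getD c []).getD (r + 1) 0 > (cols.getD c []).getD r 0 then
            PySem.Set.add res ((r : Int), (c : Int))
          else res)
        res)
    PySem.Set.empty

-- ===== PRECONDITION & SPEC =====
-- Pre_ excludes exactly the inputs where Python A raises IndexError: the empty grid
-- (grid[0]) and grids with a row shorter than the first row (grid[row][col]).
def Pre_check_visibility_vertical (grid : List (List Int)) : Prop :=
  grid ≠ [] ∧ ∀ row ∈ grid, (grid.headD []).length ≤ row.length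
instance (grid : List (List Int)) : Decidable (Pre_check_visibility_vertical grid) := by
  unfold Pre_check_visibility_vertical; infer_instance

def pvWitness_check_visibility_vertical : List (List Int) := [[3, 1], [2, 5]]

def Spec_check_visibility_vertical (grid : List (List Int)) (out : List (Int × Int)) : Prop := out = check_visibility_vertical_alt grid
instance (grid : List (List Int)) (out : List (Int × Int)) : Decidable (Spec_check_visibility_vertical grid out) := by unfold Spec_check_visibility_vertical; infer_instance

-- ===== CLAIM (what is proved, stated in full; the proofs are below) =====
def Claim_equal_check_visibility_vertical : Prop := ∀ (grid : List (List Int)), Dom_check_visibility_vertical grid → Pre_check_visibility_vertical grid → Spec_check_visibility_vertical grid (check_visibility_vertical grid)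

-- ===== LEMMAS AND PROOFS =====

-- prefix maximum of column c over the first r rows, seeded with -1
def pvPm (grid : List (List Int)) (c r : Nat) : Int :=
  ((grid.take r).map (fun row => row.getD c 0)).foldl max (-1)

theorem pvPm_zero (grid : List (List Int)) (c : Nat) : pvPm grid c 0 = -1 := rfl

theorem pvPm_succ (grid : List (List Int)) (c r : Nat) (h : r < grid.length) :
    pvPm grid c (r + 1) = max (pvPm grid c r) ((grid.getD r []).getD c 0) := by
  unfold pvPm
  have h' : grid.take (r + 1) = grid.take r ++ [grid[r]] := by
    rw [List.take_add_one, List.getElem?_eq_getElem h]; rfl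
  rw [h', List.map_append, List.foldl_append]
  simp [List.getD_eq_getElem?_getD, List.getElem?_eq_getElem h]

theorem pvGetD_mid (done todo : List (List Int)) (row : List Int) :
    (done ++ row :: todo).getD done.length [] = row := by
  induction done with
  | nil => rfl
  | cons x xs ih => simp

theorem pvColAcc_aux (c : Nat) (todo done : List (List Int)) :
    todo.foldl (fun acc row => acc ++ [max (acc.getLastD (-1)) (row.getD c 0)])
      ((List.range (done.length + 1)).map (pvPm (done ++ todo) c))
    = (List.range ((done ++ todo).length + 1)).map (pvPm (done ++ todo) c) := by
  induction todo generalizing done with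
  | nil => simp
  | cons row todo ih =>
    have hlast : ((List.range (done.length + 1)).map (pvPm (done ++ row :: todo) c)).getLastD (-1)
        = pvPm (done ++ row :: todo) c done.length := by
      rw [List.range_succ]; simp
    have hlt : done.length < (done ++ row :: todo).length := by simp
    have hstep : (List.range (done.length + 1)).map (pvPm (done ++ row :: todo) c)
        ++ [max (((List.range (done.length + 1)).map (pvPm (done ++ row :: todo) c)).getLastD (-1)) (row.getD c 0)]
        = (List.range (done.length + 1 + 1)).map (pvPm (done ++ row :: todo) c) := by
      rw [hlast, List.range_succ (n := done.length + 1), List.map_append]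
      simp only [List.map_cons, List.map_nil]
      rw [pvPm_succ _ _ _ hlt, pvGetD_mid]
    have := ih (done ++ [row])
    simp only [List.append_assoc, List.cons_append, List.nil_append, List.length_append,
      List.length_cons, List.length_nil] at this ⊢
    rw [List.foldl_cons, hstep]
    simpa [Nat.add_comm, Nat.add_assoc, Nat.add_left_comm] using this

theorem pvColAcc_eq (grid : List (List Int)) (c : Nat) :
    pvColAcc grid c = (List.range (grid.length + 1)).map (pvPm grid c) := by
  have := pvColAcc_aux c grid []
  simpa [pvColAcc, pvPm] using this

theorem pvGetD_map_range {α : Type} (f : Nat → α) (n k : Nat) (d : α) (h : k < n) :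
    ((List.range n).map f).getD k d = f k := by
  rw [List.getD_eq_getElem _ _ (by simpa using h)]
  simp

-- the per-row max-heights state after the first j columns of row r have been processed
def pvMh (grid : List (List Int)) (w r j : Nat) : List Int :=
  (List.range w).map (fun c => if c < j then pvPm grid c (r + 1) else pvPm grid c r)

theorem pvInner (grid : List (List Int)) (w r : Nat) (hr : r < grid.length) :
    ∀ (k j : Nat), j + k = w → ∀ (res : PySem.Set (Int × Int)),
    (List.range' j k).foldl
      (fun (st : List Int × PySem.Set (Int × Int)) col =>
        if (grid.getD r []).getD col 0 > st.1.getD col (-1) then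
          (st.1.set col ((grid.getD r []).getD col 0),
           PySem.Set.add st.2 ((r : Int), (col : Int)))
        else st)
      (pvMh grid w r j, res)
    = (pvMh grid w r w,
       (List.range' j k).foldl
        (fun (res : PySem.Set (Int × Int)) c =>
          if (grid.getD r []).getD c 0 > pvPm grid c r then
            PySem.Set.add res ((r : Int), (c : Int))
          else res)
        res) := by
  intro k
  induction k with
  | zero =>
    intro j hj res
    have : j = w := by omega
    subst this; simp
  | succ k ih =>
    intro j hj res
    have hjw : j < w := by omega
    have hget : (pvMh grid w r j).getD j (-1) = pvPm grid j r := by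
      unfold pvMh; rw [pvGetD_map_range _ _ _ _ hjw]; simp
    rw [List.range'_succ, List.foldl_cons, List.foldl_cons, hget]
    by_cases hc : (grid.getD r []).getD j 0 > pvPm grid j r
    · have hset : (pvMh grid w r j).set j ((grid.getD r []).getD j 0) = pvMh grid w r (j + 1) := by
        apply List.ext_getElem
        · simp [pvMh]
        · intro i h1 h2
          have hiw : i < w := by simpa [pvMh] using h2
          simp only [pvMh, List.getElem_set, List.getElem_map, List.getElem_range]
          by_cases hij : i = j
          · subst hij
            rw [if_pos rfl, if_pos (by omega : i < i + 1), pvPm_succ _ _ _ hr,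
              max_eq_right (le_of_lt hc)]
          · rw [if_neg (fun h => hij h.symm)]
            by_cases hlt : i < j
            · rw [if_pos hlt, if_pos (by omega : i < j + 1)]
            · rw [if_neg hlt, if_neg (by omega : ¬ i < j + 1)]
      rw [if_pos hc, if_pos hc, hset]
      exact ih (j + 1) (by omega) _
    · have hsame : pvMh grid w r j = pvMh grid w r (j + 1) := by
        apply List.ext_getElem
        · simp [pvMh]
        · intro i h1 h2
          have hiw : i < w := by simpa [pvMh] using h1
          simp only [pvMh, List.getElem_map, List.getElem_range]
          by_cases hij : i = j
          · subst hij
            rw [if_neg (by omega : ¬ i < i), if_pos (by omega : i < i + 1),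
              pvPm_succ _ _ _ hr, max_eq_left (not_lt.mp hc)]
          · by_cases hlt : i < j
            · rw [if_pos hlt, if_pos (by omega : i < j + 1)]
            · rw [if_neg hlt, if_neg (by omega : ¬ i < j + 1)]
      rw [if_neg hc, if_neg hc, hsame]
      exact ih (j + 1) (by omega) _

theorem pvOuter (grid : List (List Int)) (w : Nat) :
    ∀ (k i : Nat), i + k = grid.length → ∀ (res : PySem.Set (Int × Int)),
    ((List.range' i k).foldl
      (fun (st : List Int × PySem.Set (Int × Int)) row =>
        (List.range w).foldl
          (fun (st : List Int × PySem.Set (Int × Int)) col =>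
            if (grid.getD row []).getD col 0 > st.1.getD col (-1) then
              (st.1.set col ((grid.getD row []).getD col 0),
               PySem.Set.add st.2 ((row : Int), (col : Int)))
            else st)
          st)
      (pvMh grid w i 0, res)).2
    = (List.range' i k).foldl
        (fun (res : PySem.Set (Int × Int)) r =>
          (List.range w).foldl
            (fun (res : PySem.Set (Int × Int)) c =>
              if (grid.getD r []).getD c 0 > pvPm grid c r then
                PySem.Set.add res ((r : Int), (c : Int))
              else res)
            res)
        res := by
  intro k
  induction k with
  | zero => intro i hi res; simp
  | succ k ih =>
    intro i hi res
    have hlt : i < grid.length := by omega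
    rw [List.range'_succ, List.foldl_cons, List.foldl_cons]
    rw [List.range_eq_range', pvInner grid w i hlt w 0 (by omega) res]
    have hnext : pvMh grid w i w = pvMh grid w (i + 1) 0 := by
      unfold pvMh
      apply List.map_congr_left
      intro c hc
      simp only [List.mem_range] at hc
      simp [hc]
    rw [hnext, ← List.range_eq_range']
    exact ih (i + 1) (by omega) _

theorem pvMh_zero (grid : List (List Int)) (w : Nat) :
    pvMh grid w 0 0 = List.replicate w (-1) := by
  unfold pvMh
  apply List.ext_getElem
  · simp
  · intro i h1 h2
    simp [pvPm_zero]

theorem pvCond_iff (grid : List (List Int)) (w r c : Nat) (hc : c < w) (hr : r < grid.length) :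
    ((((List.range w).map (pvColAcc grid)).getD c []).getD (r + 1) 0
      > (((List.range w).map (pvColAcc grid)).getD c []).getD r 0)
    ↔ (grid.getD r []).getD c 0 > pvPm grid c r := by
  rw [pvGetD_map_range _ _ _ _ hc, pvColAcc_eq,
    pvGetD_map_range _ _ _ _ (by omega : r + 1 < grid.length + 1),
    pvGetD_map_range _ _ _ _ (by omega : r < grid.length + 1),
    pvPm_succ _ _ _ hr]
  constructor
  · intro h
    rcases lt_max_iff.mp h with h' | h'
    · exact absurd h' (lt_irrefl _)
    · exact h'
  · intro h; exact lt_max_iff.mpr (Or.inr h)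

-- ===== VERDICT (by name: the statement is the Claim_ definition above) =====
theorem check_visibility_vertical_spec : Claim_equal_check_visibility_vertical := by
  intro grid _ _
  unfold Spec_check_visibility_vertical check_visibility_vertical check_visibility_vertical_alt
  simp only []
  rw [show (List.replicate ((grid.headD []).length) (-1 : Int)) = pvMh grid ((grid.headD []).length) 0 0 from (pvMh_zero grid _).symm]
  rw [List.range_eq_range' (n := grid.length)]
  rw [pvOuter grid ((grid.headD []).length) grid.length 0 (by omega) PySem.Set.empty]
  rw [← List.range_eq_range']
  apply PySem.List.foldl_congr_mem
  intro res r hrmem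
  have hr : r < grid.length := List.mem_range.mp hrmem
  apply PySem.List.foldl_congr_mem
  intro res' c hcmem
  have hc : c < (grid.headD []).length := List.mem_range.mp hcmem
  exact if_congr (pvCond_iff grid _ r c hc hr).symm rfl rfl
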